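-- pv_equiv track=rewrite | github.com/JIANSUJIAN/leetcode | 2116.check-if-a-parentheses-string-can-be-valid.py | canBeValid
-- ===== SOURCE A (Python) =====
-- def canBeValid(s, locked):
--     # Odd-length strings can't be valid since every '(' needs a matching ')'
--     if len(s) % 2:
--         return False
--
--     # First traversal (left to right)
--     # Treat all unlocked characters as '('. If at any point we have more ')' than '(',
--     # it means there's a ')' that can't be matched by any previous '('.
--     balance = 0
--     for i in range(len(s)):
--         # If the current character is '(' or it's unlocked, increment the balance
--         # Otherwise (if it's a locked ')'), decrement the balance
--         balance += 1 if s[i] == '(' or locked[i] == '0' else -1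
--
--         # If balance goes negative, there are unmatched ')' that can't be balanced
--         if balance < 0:
--             return False
--
--     # Second traversal (right to left)
--     # Treat all unlocked characters as ')'. If at any point we have more '(' than ')',
--     # it means there's a '(' that can't be matched by any previous ')'.
--     balance = 0
--     for i in range(len(s) - 1, -1, -1):
--         # If the current character is ')' or it's unlocked, increment the balance
--         # Otherwise (if it's a locked '('), decrement the balance
--         balance += 1 if s[i] == ')' or locked[i] == '0' else -1
--
--         # If balance goes negative, there are unmatched '(' that can't be balanced
--         if balance < 0:
--             return False
--
--     # If we've gone through both traversals without imbalance, the string can be balanced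
--     return True
-- ===== SOURCE B (Python) =====
-- def canBeValid(s, locked):
--     # Single pass: track min forward-balance (unlocked as '(') and, for the
--     # backward check, prefix sums of the backward deltas with their running max;
--     # backward pass fails iff some suffix sum is negative, i.e. total < some prefix.
--     if len(s) % 2:
--         return False
--     f = 0
--     minf = 0
--     p = 0
--     maxp = 0
--     for c, l in zip(s, locked):
--         f += 1 if c == '(' or l == '0' else -1
--         if f < minf:
--             minf = f
--         if p > maxp:
--             maxp = p
--         p += 1 if c == ')' or l == '0' else -1
--     return minf >= 0 and p >= maxp
-- ===== Notes on version B (the rewrite author's own statement) =====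
-- stated objective: alternative
-- what changed: Replaces A's two directional early-exit scans (left-to-right then right-to-left) by a single forward pass over zip(s,locked) that tracks the minimum forward balance and the running maximum of backward-delta prefix sums, deciding the backward condition via 'total >= max prefix'.
-- outside the precondition, e.g. on canBeValid('))', '1'): A returns False, B returns False; on canBeValid('((', ''): A raises IndexError, B returns True
import Mathlib
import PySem

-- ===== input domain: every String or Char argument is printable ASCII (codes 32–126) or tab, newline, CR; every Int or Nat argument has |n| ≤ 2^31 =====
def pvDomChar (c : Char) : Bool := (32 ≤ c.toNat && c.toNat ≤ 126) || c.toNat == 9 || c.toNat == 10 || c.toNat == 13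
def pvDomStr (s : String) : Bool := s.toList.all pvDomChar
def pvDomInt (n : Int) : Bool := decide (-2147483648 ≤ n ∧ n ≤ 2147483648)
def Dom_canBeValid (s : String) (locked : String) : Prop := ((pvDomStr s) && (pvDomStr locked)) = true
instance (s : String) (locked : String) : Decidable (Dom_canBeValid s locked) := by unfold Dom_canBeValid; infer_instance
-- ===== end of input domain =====

-- B replaces A's two directional early-exit scans with one forward pass over zip(s,locked)
-- tracking min forward balance and max backward prefix sum (alternative decomposition, same cost).


-- ===== PORT A =====
-- s[i]/locked[i]: under Pre_ every accessed index is in range, so the default is unreachable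
def pvCharAt (cs : List Char) (i : Int) : Char := (PySem.List.pyGet? cs i).getD ' '

-- first traversal: for i in range(len(s)): balance += …; if balance < 0: return False
def canBeValidFwd (cs ls : List Char) : List Int → Int → Bool
  | [], _ => true
  | i :: rest, bal =>
    let bal := bal + (if pvCharAt cs i == '(' || pvCharAt ls i == '0' then (1 : Int) else -1)
    if bal < 0 then false else canBeValidFwd cs ls rest bal

-- second traversal: for i in range(len(s)-1, -1, -1): …
def canBeValidBwd (cs ls : List Char) : List Int → Int → Bool
  | [], _ => true
  | i :: rest, bal =>
    let bal := bal + (if pvCharAt cs i == ')' || pvCharAt ls i == '0' then (1 : Int) else -1)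
    if bal < 0 then false else canBeValidBwd cs ls rest bal

def canBeValid (s : String) (locked : String) : Bool :=
  let cs := s.toList
  let ls := locked.toList
  if cs.length % 2 = 1 then false
  else if canBeValidFwd cs ls (PySem.List.pyRange 0 cs.length) 0 then
    canBeValidBwd cs ls (PySem.List.pyRange ((cs.length : Int) - 1) (-1) (-1)) 0
  else false

-- ===== PORT B =====
-- state (f, minf, p, maxp), updated once per zipped pair
def canBeValidStep (st : Int × Int × Int × Int) (x : Char × Char) : Int × Int × Int × Int :=
  let f := st.1 + (if x.1 == '(' || x.2 == '0' then (1 : Int) else -1)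
  let minf := if f < st.2.1 then f else st.2.1
  let maxp := if st.2.2.1 > st.2.2.2 then st.2.2.1 else st.2.2.2
  let p := st.2.2.1 + (if x.1 == ')' || x.2 == '0' then (1 : Int) else -1)
  (f, minf, p, maxp)

def canBeValid_alt (s : String) (locked : String) : Bool :=
  let cs := s.toList
  let ls := locked.toList
  if cs.length % 2 = 1 then false
  else
    let st := (cs.zip ls).foldl canBeValidStep (0, 0, 0, 0)
    decide (st.2.1 ≥ 0) && decide (st.2.2.1 ≥ st.2.2.2)

-- ===== PRECONDITION & SPEC =====
-- Pre_ excludes even-length inputs whose locked string is shorter than s: there A raises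
-- IndexError, except when an early negative balance already returned False first.
def Pre_canBeValid (s : String) (locked : String) : Prop :=
  s.toList.length % 2 = 1 ∨ s.toList.length ≤ locked.toList.length
instance (s : String) (locked : String) : Decidable (Pre_canBeValid s locked) := by
  unfold Pre_canBeValid; infer_instance

def pvWitness_canBeValid : String × String := ("()", "01")

def Spec_canBeValid (s : String) (locked : String) (out : Bool) : Prop := out = canBeValid_alt s locked
instance (s : String) (locked : String) (out : Bool) : Decidable (Spec_canBeValid s locked out) := by
  unfold Spec_canBeValid; infer_instance

-- ===== CLAIM (what is proved, stated in full; the proofs are below) =====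
def Claim_equal_canBeValid : Prop := ∀ (s : String) (locked : String), Dom_canBeValid s locked → Pre_canBeValid s locked → Spec_canBeValid s locked (canBeValid s locked)

-- ===== LEMMAS AND PROOFS =====

-- forward/backward per-pair deltas
def dF (x : Char × Char) : Int := if x.1 == '(' || x.2 == '0' then 1 else -1
def dB (x : Char × Char) : Int := if x.1 == ')' || x.2 == '0' then 1 else -1

-- generic early-exit scan over a list of pairs
def scanOk (δ : Char × Char → Int) : List (Char × Char) → Int → Bool
  | [], _ => true
  | x :: r, bal => let bal := bal + δ x; if bal < 0 then false else scanOk δ r bal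

-- partial sums AFTER each element, starting from s
def pSums (δ : Char × Char → Int) : List (Char × Char) → Int → List Int
  | [], _ => []
  | x :: r, s => (s + δ x) :: pSums δ r (s + δ x)

-- partial sums BEFORE each element, starting from s
def prefs (δ : Char × Char → Int) : List (Char × Char) → Int → List Int
  | [], _ => []
  | x :: r, s => s :: prefs δ r (s + δ x)

lemma scanOk_eq (δ : Char × Char → Int) (q : List (Char × Char)) (bal : Int) :
    scanOk δ q bal = decide (∀ t ∈ pSums δ q bal, 0 ≤ t) := by
  induction q generalizing bal with
  | nil => simp [scanOk, pSums]
  | cons x r ih =>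
    simp only [scanOk, pSums, List.mem_cons, ih]
    by_cases h : bal + δ x < 0
    · simp only [if_pos h]
      symm
      simp only [decide_eq_false_iff_not]
      push Not
      exact ⟨bal + δ x, List.mem_cons_self, by omega⟩
    · simp only [if_neg h]
      rw [decide_eq_decide]
      constructor
      · intro hq t ht
        rcases List.mem_cons.mp ht with rfl | ht
        · omega
        · exact hq t ht
      · intro hq t ht
        exact hq t (List.mem_cons_of_mem _ ht)

lemma prefs_shift (δ : Char × Char → Int) (q : List (Char × Char)) (a s : Int) :
    prefs δ q (a + s) = (prefs δ q s).map (a + ·) := by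
  induction q generalizing s with
  | nil => simp [prefs]
  | cons x r ih => simp [prefs, ← ih, add_assoc]

lemma pSums_append (δ : Char × Char → Int) (u v : List (Char × Char)) (s : Int) :
    pSums δ (u ++ v) s = pSums δ u s ++ pSums δ v (s + (u.map δ).sum) := by
  induction u generalizing s with
  | nil => simp [pSums]
  | cons x r ih => simp [pSums, ih, add_assoc]

lemma mem_pSums_reverse (δ : Char × Char → Int) (q : List (Char × Char)) (t : Int) :
    t ∈ pSums δ q.reverse 0 ↔ ∃ p ∈ prefs δ q 0, t = (q.map δ).sum - p := by
  induction q with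
  | nil => simp [pSums, prefs]
  | cons x r ih =>
    have hsh : prefs δ r (0 + δ x) = (prefs δ r 0).map (δ x + ·) := by
      rw [zero_add]
      simpa using prefs_shift δ r (δ x) 0
    have hrev : ((r.reverse.map δ).sum : Int) = (r.map δ).sum := by
      rw [List.map_reverse, List.sum_reverse]
    rw [List.reverse_cons, pSums_append]
    simp only [List.mem_append, pSums, List.mem_cons, prefs, List.map_cons,
      List.sum_cons, ih, hsh, List.mem_map, List.not_mem_nil, or_false]
    constructor
    · rintro (⟨p, hp, rfl⟩ | rfl)
      · exact ⟨δ x + p, Or.inr ⟨p, hp, rfl⟩, by omega⟩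
      · exact ⟨0, Or.inl rfl, by omega⟩
    · rintro ⟨p, hp, rfl⟩
      rcases hp with rfl | ⟨p', hp', rfl⟩
      · right; omega
      · left
        exact ⟨p', hp', by omega⟩

lemma foldl_min_nonneg (L : List Int) (a : Int) :
    (0 ≤ L.foldl min a) ↔ (0 ≤ a ∧ ∀ t ∈ L, 0 ≤ t) := by
  induction L generalizing a with
  | nil => simp
  | cons x r ih =>
    simp only [List.foldl_cons, ih, List.mem_cons]
    constructor
    · rintro ⟨h1, h2⟩
      refine ⟨by omega, fun t ht => ?_⟩
      rcases ht with rfl | ht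
      · simp [min_def] at h1; omega
      · exact h2 t ht
    · rintro ⟨h1, h2⟩
      exact ⟨by have := h2 x (Or.inl rfl); omega, fun t ht => h2 t (Or.inr ht)⟩

lemma foldl_max_le (L : List Int) (a T : Int) :
    (L.foldl max a ≤ T) ↔ (a ≤ T ∧ ∀ t ∈ L, t ≤ T) := by
  induction L generalizing a with
  | nil => simp
  | cons x r ih =>
    simp only [List.foldl_cons, ih, List.mem_cons]
    constructor
    · rintro ⟨h1, h2⟩
      refine ⟨by omega, fun t ht => ?_⟩
      rcases ht with rfl | ht
      · simp [max_def] at h1; omega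
      · exact h2 t ht
    · rintro ⟨h1, h2⟩
      exact ⟨by have := h2 x (Or.inl rfl); omega, fun t ht => h2 t (Or.inr ht)⟩

-- the four components of B's fold
lemma fold_minf (q : List (Char × Char)) (st : Int × Int × Int × Int) :
    (q.foldl canBeValidStep st).2.1 = (pSums dF q st.1).foldl min st.2.1 := by
  induction q generalizing st with
  | nil => simp [pSums]
  | cons x r ih =>
    simp only [List.foldl_cons, pSums, ih]
    congr 1
    simp [canBeValidStep, dF, min_def]
    split_ifs <;> omega

lemma fold_p (q : List (Char × Char)) (st : Int × Int × Int × Int) :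
    (q.foldl canBeValidStep st).2.2.1 = st.2.2.1 + (q.map dB).sum := by
  induction q generalizing st with
  | nil => simp
  | cons x r ih =>
    simp only [List.foldl_cons, ih, List.map_cons, List.sum_cons]
    simp [canBeValidStep, dB]
    omega

lemma fold_maxp (q : List (Char × Char)) (st : Int × Int × Int × Int) :
    (q.foldl canBeValidStep st).2.2.2 = (prefs dB q st.2.2.1).foldl max st.2.2.2 := by
  induction q generalizing st with
  | nil => simp [prefs]
  | cons x r ih =>
    simp only [List.foldl_cons, prefs, ih]
    congr 1
    simp [canBeValidStep, max_def]
    split_ifs <;> omega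

-- step -1 range cons
lemma pyRange_neg_one_cons (a b : Int) (h : b < a) :
    PySem.List.pyRange a b (-1) = a :: PySem.List.pyRange (a - 1) b (-1) := by
  simp only [PySem.List.pyRange]
  norm_num [h]
  split_ifs with h2
  · have : (a - b).toNat = (a - 1 - b).toNat + 1 := by omega
    rw [this, List.range_succ_eq_map]
    simp only [List.map_cons, List.map_map]
    refine List.cons_eq_cons.mpr ⟨by norm_num, ?_⟩
    apply List.map_congr_left
    intro k _
    simp only [Function.comp_apply]
    push_cast
    ring
  · have : (a - b).toNat = 1 := by omega
    rw [this]
    simp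

-- bridge A's forward loop to scanOk over the zip
lemma fwd_bridge (cs ls : List Char) (h : cs.length ≤ ls.length) :
    ∀ k, k ≤ cs.length → ∀ bal,
      canBeValidFwd cs ls (PySem.List.pyRange k cs.length) bal
        = scanOk dF ((cs.zip ls).drop k) bal := by
  suffices H : ∀ n k, cs.length - k = n → k ≤ cs.length → ∀ bal,
      canBeValidFwd cs ls (PySem.List.pyRange k cs.length) bal
        = scanOk dF ((cs.zip ls).drop k) bal by
    exact fun k hk bal => H (cs.length - k) k rfl hk bal
  intro n
  induction n with
  | zero =>
    intro k hn hk bal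
    have hk' : k = cs.length := by omega
    subst hk'
    rw [List.drop_of_length_le (by rw [List.length_zip]; omega)]
    have : PySem.List.pyRange (cs.length : Int) (cs.length : Int) = [] := by
      simp [PySem.List.pyRange]
    rw [this]
    rfl
  | succ m ih =>
    intro k hn hk bal
    have hlt : k < cs.length := by omega
    have hzlt : k < (cs.zip ls).length := by
      simp [List.length_zip]; omega
    rw [PySem.List.pyRange_one_cons (by exact_mod_cast hlt)]
    rw [List.drop_eq_getElem_cons hzlt]
    have hcs : pvCharAt cs (k : Int) = cs[k] := by
      simp [pvCharAt, PySem.List.pyGet?_natCast, List.getElem?_eq_getElem hlt]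
    have hls : pvCharAt ls (k : Int) = ls[k]'(by omega) := by
      simp [pvCharAt, PySem.List.pyGet?_natCast, List.getElem?_eq_getElem (show k < ls.length by omega)]
    have hget : (cs.zip ls)[k]'hzlt = (cs[k]'hlt, ls[k]'(by omega)) := by
      simp [List.getElem_zip]
    simp only [canBeValidFwd, scanOk, hcs, hls, hget, dF]
    have hcast : (k : Int) + 1 = ((k + 1 : Nat) : Int) := by push_cast; ring
    split_ifs <;>
      first
        | rfl
        | (rw [hcast]; exact ih (k + 1) (by omega) (by omega) _)

-- bridge A's backward loop to scanOk over the reversed zip prefix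
lemma bwd_bridge (cs ls : List Char) (h : cs.length ≤ ls.length) :
    ∀ k, k ≤ cs.length → ∀ bal,
      canBeValidBwd cs ls (PySem.List.pyRange ((k : Int) - 1) (-1) (-1)) bal
        = scanOk dB (((cs.zip ls).take k).reverse) bal := by
  intro k
  induction k with
  | zero =>
    intro _ bal
    have hc0 : ((0 : Nat) : Int) - 1 = (0 : Int) - 1 := by norm_num
    rw [hc0]
    have : PySem.List.pyRange ((0 : Int) - 1) (-1) (-1) = [] := by
      simp [PySem.List.pyRange]
    rw [this]
    rfl
  | succ m ih =>
    intro hk bal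
    have hlt : m < cs.length := by omega
    have hzlt : m < (cs.zip ls).length := by
      simp [List.length_zip]; omega
    have hc1 : ((m + 1 : Nat) : Int) - 1 = (m : Int) := by push_cast; ring
    rw [hc1, pyRange_neg_one_cons (m : Int) (-1) (by omega)]
    rw [List.take_add_one, List.getElem?_eq_getElem hzlt]
    have hget : (cs.zip ls)[m]'hzlt = (cs[m]'hlt, ls[m]'(by omega)) := by
      simp [List.getElem_zip]
    rw [hget]
    simp only [Option.toList_some, List.reverse_append, List.reverse_singleton, List.singleton_append]
    have hcs : pvCharAt cs (m : Int) = cs[m] := by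
      simp [pvCharAt, PySem.List.pyGet?_natCast, List.getElem?_eq_getElem hlt]
    have hls : pvCharAt ls (m : Int) = ls[m]'(by omega) := by
      simp [pvCharAt, PySem.List.pyGet?_natCast, List.getElem?_eq_getElem (show m < ls.length by omega)]
    simp only [canBeValidBwd, scanOk, hcs, hls, dB]
    split_ifs <;>
      first
        | rfl
        | exact ih (by omega) _

-- the backward scan condition as "total ≥ every prefix"
lemma bwd_cond (δ : Char × Char → Int) (pl : List (Char × Char)) :
    (∀ t ∈ pSums δ pl.reverse 0, 0 ≤ t)
      ↔ ((0 : Int) ≤ (pl.map δ).sum ∧ ∀ p ∈ prefs δ pl 0, p ≤ (pl.map δ).sum) := by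
  constructor
  · intro H
    constructor
    · cases pl with
      | nil => simp
      | cons x r =>
        have h0 : (0 : Int) ∈ prefs δ (x :: r) 0 := by simp [prefs]
        have := H _ ((mem_pSums_reverse δ (x :: r) _).mpr ⟨0, h0, rfl⟩)
        omega
    · intro p hp
      have := H _ ((mem_pSums_reverse δ pl _).mpr ⟨p, hp, rfl⟩)
      omega
  · rintro ⟨h0, H⟩ t ht
    rcases (mem_pSums_reverse δ pl t).mp ht with ⟨p, hp, rfl⟩
    have := H p hp
    omega

-- ===== VERDICT (by name: the statement is the Claim_ definition above) =====
theorem canBeValid_spec : Claim_equal_canBeValid := by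
  intro s locked _ hpre
  unfold Spec_canBeValid canBeValid canBeValid_alt
  by_cases hodd : s.toList.length % 2 = 1
  · rw [if_pos hodd, if_pos hodd]
  · rw [if_neg hodd, if_neg hodd]
    have h : s.toList.length ≤ locked.toList.length := by
      rcases hpre with hp | hp
      · exact absurd hp hodd
      · exact hp
    have hf := fwd_bridge s.toList locked.toList h 0 (by omega) 0
    rw [Nat.cast_zero, List.drop_zero] at hf
    have hb := bwd_bridge s.toList locked.toList h s.toList.length le_rfl 0
    rw [List.take_of_length_le (by rw [List.length_zip]; omega)] at hb
    rw [hf, hb]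
    rw [scanOk_eq, scanOk_eq]
    show _ = (decide ((List.foldl canBeValidStep (0, 0, 0, 0) (s.toList.zip locked.toList)).2.1 ≥ 0) &&
      decide ((List.foldl canBeValidStep (0, 0, 0, 0) (s.toList.zip locked.toList)).2.2.1 ≥
        (List.foldl canBeValidStep (0, 0, 0, 0) (s.toList.zip locked.toList)).2.2.2))
    rw [fold_minf (s.toList.zip locked.toList) (0, 0, 0, 0),
        fold_p (s.toList.zip locked.toList) (0, 0, 0, 0),
        fold_maxp (s.toList.zip locked.toList) (0, 0, 0, 0)]
    simp only [zero_add]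
    rw [show ∀ (a b : Bool), (if a then b else false) = (a && b) from fun a b => by cases a <;> rfl]
    congr 1
    · rw [decide_eq_decide, ge_iff_le, foldl_min_nonneg]
      exact ⟨fun H => ⟨le_refl 0, H⟩, fun H => H.2⟩
    · rw [decide_eq_decide, bwd_cond, ge_iff_le, foldl_max_le]
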